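-- pv_equiv track=rewrite | github.com/frants-jeon/programmers | programmers/level1/programmers_82612.py | solution
-- ===== SOURCE A (Python) =====
-- def solution(price, money, count):
--     payment = 0
--     for i in range(1, count + 1):
--         payment += price * i
--
--     if payment - money > 0:
--         return payment - money
--     else:
--         return 0
-- ===== SOURCE B (Python) =====
-- def solution(price, money, count):
--     n = count if count > 0 else 0
--     total = price * n * (n + 1) // 2
--     extra = total - money
--     return extra if extra > 0 else 0
-- ===== Notes on version B (the rewrite author's own statement) =====
-- stated objective: faster
-- what changed: replaces the O(count) accumulation loop with the closed-form arithmetic-series formula price*count*(count+1)//2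
import Mathlib
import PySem

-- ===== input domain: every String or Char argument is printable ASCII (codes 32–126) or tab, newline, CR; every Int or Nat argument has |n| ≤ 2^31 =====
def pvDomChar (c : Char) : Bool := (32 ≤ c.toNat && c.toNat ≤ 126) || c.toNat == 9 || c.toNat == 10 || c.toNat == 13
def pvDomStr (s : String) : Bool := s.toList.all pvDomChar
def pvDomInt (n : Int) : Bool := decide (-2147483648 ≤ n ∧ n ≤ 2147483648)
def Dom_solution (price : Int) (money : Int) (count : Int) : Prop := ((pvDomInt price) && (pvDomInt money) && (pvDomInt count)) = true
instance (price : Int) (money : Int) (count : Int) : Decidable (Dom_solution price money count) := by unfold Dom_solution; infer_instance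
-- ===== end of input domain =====

-- B replaces A's O(count) accumulation loop with the closed-form arithmetic-series formula (faster).

-- ===== PORT A =====
def solution (price : Int) (money : Int) (count : Int) : Int :=
  let payment := (PySem.List.pyRange 1 (count + 1) 1).foldl (fun acc i => acc + price * i) 0
  if payment - money > 0 then payment - money else 0

-- ===== PORT B =====
def solution_alt (price : Int) (money : Int) (count : Int) : Int :=
  let n := if count > 0 then count else 0
  let total := PySem.Int.floordiv (price * n * (n + 1)) 2
  let extra := total - money
  if extra > 0 then extra else 0

-- ===== PRECONDITION & SPEC =====
def Spec_solution (price : Int) (money : Int) (count : Int) (out : Int) : Prop := out = solution_alt price money count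
instance (price : Int) (money : Int) (count : Int) (out : Int) : Decidable (Spec_solution price money count out) := by unfold Spec_solution; infer_instance

-- ===== CLAIM (what is proved, stated in full; the proofs are below) =====
def Claim_equal_solution : Prop := ∀ (price : Int) (money : Int) (count : Int), Dom_solution price money count → Spec_solution price money count (solution price money count)

-- ===== LEMMAS AND PROOFS =====

-- 2 × (the loop's sum over range(1, n+1)) = 2·init + price·n·(n+1)
theorem pv_sum_lemma (price : Int) (n : Nat) (init : Int) :
    2 * ((PySem.List.pyRange 1 ((n : Int) + 1) 1).foldl (fun acc i => acc + price * i) init)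
      = 2 * init + price * n * (n + 1) := by
  induction n generalizing init with
  | zero =>
    rw [PySem.List.pyRange_one_eq_nil (by norm_num)]
    simp
  | succ k ih =>
    rw [show ((k + 1 : Nat) : Int) + 1 = ((k : Int) + 1) + 1 by push_cast; ring,
        PySem.List.pyRange_one_succ_right (by omega), List.foldl_append]
    simp only [List.foldl_cons, List.foldl_nil]
    push_cast
    linear_combination ih init

theorem pv_main (price money count : Int) :
    solution price money count = solution_alt price money count := by
  unfold solution solution_alt
  by_cases h : count > 0
  · have hn : count = ((count.toNat : Nat) : Int) := by omega
    simp only [if_pos h]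
    rw [hn]
    have hs := pv_sum_lemma price count.toNat 0
    have h2 : price * (count.toNat : Int) * ((count.toNat : Int) + 1)
        = 2 * ((PySem.List.pyRange 1 ((count.toNat : Int) + 1) 1).foldl
            (fun acc i => acc + price * i) 0) := by omega
    rw [h2, PySem.Int.floordiv_eq_ediv_of_pos (by norm_num), Int.mul_ediv_cancel_left _ (by norm_num)]
  · simp only [if_neg h]
    rw [PySem.List.pyRange_one_eq_nil (by omega)]
    norm_num [PySem.Int.floordiv_eq_ediv_of_pos]

-- ===== VERDICT (by name: the statement is the Claim_ definition above) =====
theorem solution_spec : Claim_equal_solution := by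
  intro price money count _
  unfold Spec_solution
  exact pv_main price money count
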